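-- pv_equiv track=rewrite | github.com/Erucolindo96/vocabulae-adsunt | lecture/wolnelektury/service/TextPreprocessing.py | remove_author_and_title
-- ===== SOURCE A (Python) =====
-- def remove_author_and_title(text):
--     line = 0
--     idx_to_remove = 0
--     for idx, char in enumerate(text[:1000]):
--         if char == '\n':
--             line += 1
--         if line == 4 and char == '\n':
--             idx_to_remove = idx
--     return text[idx_to_remove:]
-- ===== SOURCE B (Python) =====
-- def remove_author_and_title(text):
--     parts = text[:1000].split('\n')
--     if len(parts) <= 4:
--         return text
--     offset = len(parts[0]) + len(parts[1]) + len(parts[2]) + len(parts[3]) + 3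
--     return text[offset:]
-- ===== Notes on version B (the rewrite author's own statement) =====
-- stated objective: alternative
-- what changed: Instead of enumerating the first 1000 characters with a running line counter that records the 4th-newline index, B splits the first 1000 characters on ' ' once and derives the cut offset arithmetically from the lengths of the first four parts (returning the text unchanged when there are at most 4 parts).
import Mathlib
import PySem

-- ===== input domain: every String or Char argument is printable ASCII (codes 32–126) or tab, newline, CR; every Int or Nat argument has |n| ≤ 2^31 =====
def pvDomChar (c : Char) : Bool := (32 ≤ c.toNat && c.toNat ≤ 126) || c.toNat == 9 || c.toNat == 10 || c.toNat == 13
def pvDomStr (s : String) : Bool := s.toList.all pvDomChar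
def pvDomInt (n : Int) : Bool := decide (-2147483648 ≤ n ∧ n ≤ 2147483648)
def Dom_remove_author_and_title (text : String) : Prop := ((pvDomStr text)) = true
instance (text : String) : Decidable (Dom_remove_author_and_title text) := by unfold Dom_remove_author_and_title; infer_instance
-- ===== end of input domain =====

-- B replaces A's char-by-char scan with a line counter by one split('\n') of the first 1000
-- chars plus length arithmetic on the first four parts (different decomposition, same cost).
-- ===== PORT A =====
-- step of A's for-loop body: update the line counter, then maybe record the index
def stepA (s : Int × Int) (p : Int × Char) : Int × Int :=
  let line := if p.2 = '\n' then s.1 + 1 else s.1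
  let idx  := if line = 4 ∧ p.2 = '\n' then p.1 else s.2
  (line, idx)

def remove_author_and_title (text : String) : String :=
  let st := (PySem.List.enumerate (PySem.Str.slice text none (some 1000)).toList 0).foldl stepA (0, 0)
  PySem.Str.slice text (some st.2) none

-- ===== PORT B =====
-- B: split the first 1000 chars on '\n'; the cut offset is arithmetic on the first four parts
def remove_author_and_title_alt (text : String) : String :=
  let parts := PySem.Chars.splitOn (PySem.Str.slice text none (some 1000)).toList ['\n']
  if parts.length ≤ 4 then text
  else
    let offset : Int := (parts.getD 0 []).length + (parts.getD 1 []).length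
      + (parts.getD 2 []).length + (parts.getD 3 []).length + 3
    PySem.Str.slice text (some offset) none

-- ===== PRECONDITION & SPEC =====
def Spec_remove_author_and_title (text : String) (out : String) : Prop := out = remove_author_and_title_alt text
instance (text : String) (out : String) : Decidable (Spec_remove_author_and_title text out) := by unfold Spec_remove_author_and_title; infer_instance

-- ===== CLAIM (what is proved, stated in full; the proofs are below) =====
def Claim_equal_remove_author_and_title : Prop := ∀ (text : String), Dom_remove_author_and_title text → Spec_remove_author_and_title text (remove_author_and_title text)

-- ===== LEMMAS AND PROOFS =====

-- index of the k-th newline (1-based) in a char list, if any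
def nthNL : List Char → Nat → Option Nat
  | _, 0 => none
  | [], _ + 1 => none
  | c :: rest, k + 1 =>
    if c = '\n' then (if k = 0 then some 0 else (nthNL rest k).map (· + 1))
    else (nthNL rest (k + 1)).map (· + 1)

-- structural reference version of str.split('\n')
def splitNL (pre : List Char) : List Char → List (List Char)
  | [] => [pre]
  | c :: rest => if c = '\n' then pre :: splitNL [] rest else splitNL (pre ++ [c]) rest

lemma splitNL_ne_nil (pre : List Char) (l : List Char) : splitNL pre l ≠ [] := by
  induction l generalizing pre with
  | nil => simp [splitNL]
  | cons c rest ih => by_cases h : c = '\n' <;> simp [splitNL, h, ih]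

lemma go_nil (fuel : Nat) (cur : List Char) (acc : List (List Char)) :
    PySem.Chars.splitOn.go ['\n'] fuel [] cur acc = acc.reverse ++ [cur.reverse] := by
  cases fuel <;> simp [PySem.Chars.splitOn.go.eq_def]

lemma go_cons (f : Nat) (cur : List Char) (acc : List (List Char)) (c : Char) (rest : List Char) :
    PySem.Chars.splitOn.go ['\n'] (f + 1) (c :: rest) cur acc =
      if c = '\n' then PySem.Chars.splitOn.go ['\n'] f rest [] (cur.reverse :: acc)
      else PySem.Chars.splitOn.go ['\n'] f rest (c :: cur) acc := by
  rw [PySem.Chars.splitOn.go.eq_def]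
  by_cases h : c = '\n'
  · simp [List.isPrefixOf, h]
  · simp [List.isPrefixOf, h]
    intro hc
    exact absurd hc.symm h

lemma go_eq_splitNL (l : List Char) : ∀ (fuel : Nat) (cur : List Char) (acc : List (List Char)),
    l.length ≤ fuel →
    PySem.Chars.splitOn.go ['\n'] fuel l cur acc = acc.reverse ++ splitNL cur.reverse l := by
  induction l with
  | nil => intro fuel cur acc _; simp [go_nil, splitNL]
  | cons c rest ih =>
    intro fuel cur acc hf
    cases fuel with
    | zero => simp at hf
    | succ f =>
      rw [go_cons]
      by_cases h : c = '\n'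
      · rw [if_pos h, ih f [] (cur.reverse :: acc) (by simp at hf; omega)]
        simp [splitNL, h]
      · rw [if_neg h, ih f (c :: cur) acc (by simp at hf; omega)]
        simp [splitNL, h]

lemma splitOn_eq_splitNL (l : List Char) : PySem.Chars.splitOn l ['\n'] = splitNL [] l := by
  unfold PySem.Chars.splitOn
  rw [go_eq_splitNL l (l.length + 1) [] [] (by omega)]
  simp

-- A's loop once the counter has reached 4: the recorded index never changes
lemma foldA_done (l : List Char) : ∀ (s line idx : Int), 4 ≤ line →
    ((PySem.List.enumerate l s).foldl stepA (line, idx)).2 = idx := by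
  induction l with
  | nil => intro s line idx _; simp [PySem.List.enumerate]
  | cons c rest ih =>
    intro s line idx hline
    rw [PySem.List.enumerate_cons, List.foldl_cons]
    have hstep : stepA (line, idx) (s, c) = (if c = '\n' then line + 1 else line, idx) := by
      simp only [stepA]
      by_cases h : c = '\n' <;> simp [h] <;> omega
    rw [hstep]
    apply ih
    by_cases h : c = '\n' <;> simp [h] <;> omega

-- A's loop while still k (1 ≤ k ≤ 4) newlines short of the 4th: it lands on the k-th newline of the rest
lemma foldA (l : List Char) : ∀ (s idx : Int) (k : Nat), 1 ≤ k → k ≤ 4 →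
    ((PySem.List.enumerate l s).foldl stepA ((4 : Int) - k, idx)).2 =
      match nthNL l k with
      | some j => s + (j : Int)
      | none => idx := by
  induction l with
  | nil =>
    intro s idx k hk1 _
    match k, hk1 with
    | k + 1, _ => simp [PySem.List.enumerate, nthNL]
  | cons c rest ih =>
    intro s idx k hk1 hk4
    rw [PySem.List.enumerate_cons, List.foldl_cons]
    by_cases h : c = '\n'
    · have hstep : stepA ((4 : Int) - k, idx) (s, c) =
          ((4 : Int) - k + 1, if k = 1 then s else idx) := by
        simp only [stepA, h]
        by_cases hk : k = 1
        · subst hk; norm_num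
        · have : ¬((4 : Int) - k + 1 = 4) := by
            intro hc; apply hk
            have : (k : Int) = 1 := by omega
            exact_mod_cast this
          simp [this, hk]
      rw [hstep]
      by_cases hk : k = 1
      · subst hk
        rw [if_pos rfl]
        have h4 : (4 : Int) - (1 : Nat) + 1 = 4 := by norm_num
        rw [h4, foldA_done rest (s + 1) 4 s (le_refl _)]
        simp [nthNL, h]
      · rw [if_neg hk]
        match k, hk1, hk with
        | k + 1, _, hk =>
          have hk0 : k ≠ 0 := by omega
          have harith : (4 : Int) - (k + 1 : Nat) + 1 = (4 : Int) - (k : Nat) := by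
            push_cast; ring
          rw [harith, ih (s + 1) idx k (by omega) (by omega)]
          simp only [nthNL, h, if_neg hk0]
          cases nthNL rest k
          · simp
          · simp
            ring
    · have hstep : stepA ((4 : Int) - k, idx) (s, c) = ((4 : Int) - k, idx) := by
        simp [stepA, h]
      rw [hstep, ih (s + 1) idx k hk1 hk4]
      match k, hk1 with
      | k + 1, _ =>
        simp only [nthNL, h]
        cases nthNL rest (k + 1)
        · simp
        · simp
          ring

-- splitNL against nthNL: part count vs. existence, and the offset arithmetic
lemma key (l : List Char) : ∀ (pre : List Char) (k : Nat), 1 ≤ k →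
    if (splitNL pre l).length ≤ k then nthNL l k = none
    else ∃ j, nthNL l k = some j ∧
      pre.length + j + 1 = (((splitNL pre l).take k).map List.length).sum + k := by
  induction l with
  | nil =>
    intro pre k hk1
    match k, hk1 with
    | k + 1, _ => simp [splitNL, nthNL]
  | cons c rest ih =>
    intro pre k hk1
    by_cases h : c = '\n'
    · have hsp : splitNL pre (c :: rest) = pre :: splitNL [] rest := by
        simp [splitNL, h]
      match k, hk1 with
      | k + 1, _ =>
        have hnth : nthNL (c :: rest) (k + 1) =
            (if k = 0 then some 0 else (nthNL rest k).map (· + 1)) := by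
          simp [nthNL, h]
        rw [hsp, hnth, List.length_cons]
        by_cases hk : k = 0
        · subst hk
          have hpos : 1 ≤ (splitNL ([] : List Char) rest).length :=
            List.length_pos_of_ne_nil (splitNL_ne_nil [] rest)
          rw [if_neg (by omega)]
          exact ⟨0, by simp, by simp⟩
        · have := ih [] k (by omega)
          rw [if_neg hk]
          by_cases hle : (splitNL ([] : List Char) rest).length ≤ k
          · rw [if_pos (by omega)]
            rw [if_pos hle] at this
            simp [this]
          · rw [if_neg (by omega)]
            rw [if_neg hle] at this
            obtain ⟨j, hj, hsum⟩ := this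
            refine ⟨j + 1, by simp [hj], ?_⟩
            simp only [List.take_succ_cons, List.map_cons, List.sum_cons]
            simp at hsum ⊢
            omega
    · have hsp : splitNL pre (c :: rest) = splitNL (pre ++ [c]) rest := by
        simp [splitNL, h]
      match k, hk1 with
      | k + 1, _ =>
        have hnth : nthNL (c :: rest) (k + 1) = (nthNL rest (k + 1)).map (· + 1) := by
          simp [nthNL, h]
        rw [hsp, hnth]
        have := ih (pre ++ [c]) (k + 1) (by omega)
        by_cases hle : (splitNL (pre ++ [c]) rest).length ≤ k + 1
        · rw [if_pos hle]
          rw [if_pos hle] at this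
          simp [this]
        · rw [if_neg hle]
          rw [if_neg hle] at this
          obtain ⟨j, hj, hsum⟩ := this
          refine ⟨j + 1, by simp [hj], ?_⟩
          simp at hsum ⊢
          omega

-- ===== VERDICT (by name: the statement is the Claim_ definition above) =====
set_option maxHeartbeats 1000000 in
theorem remove_author_and_title_spec : Claim_equal_remove_author_and_title := by
  intro text _
  unfold Spec_remove_author_and_title remove_author_and_title remove_author_and_title_alt
  simp only []
  set l := (PySem.Str.slice text none (some 1000)).toList with hl
  rw [splitOn_eq_splitNL]
  have hA : ((PySem.List.enumerate l 0).foldl stepA (0, 0)).2 =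
      match nthNL l 4 with
      | some j => (j : Int)
      | none => (0 : Int) := by
    have h0 := foldA l 0 0 4 (by omega) (by omega)
    norm_num at h0
    rw [h0]
  have hkey := key l [] 4 (by omega)
  by_cases hle : (splitNL ([] : List Char) l).length ≤ 4
  · rw [if_pos hle] at hkey
    rw [if_pos hle]
    rw [hA, hkey]
    simp [PySem.Str.slice]
  · rw [if_neg hle]
    rw [if_neg hle] at hkey
    obtain ⟨j, hj, hsum⟩ := hkey
    rw [hA, hj]
    simp only []
    congr 1
    obtain ⟨p0, p1, p2, p3, ps, hps⟩ :
        ∃ p0 p1 p2 p3 ps, splitNL ([] : List Char) l = p0 :: p1 :: p2 :: p3 :: ps := by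
      match hm : splitNL ([] : List Char) l with
      | p0 :: p1 :: p2 :: p3 :: p4 :: ps => exact ⟨p0, p1, p2, p3, p4 :: ps, rfl⟩
      | [] | [_] | [_, _] | [_, _, _] | [_, _, _, _] => rw [hm] at hle; simp at hle
    rw [hps] at hsum ⊢
    simp at hsum ⊢
    omega
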